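-- pv_equiv track=rewrite | github.com/hzhang25/causalab | causalab/experiments/visualizations/text_analysis.py | _find_contiguous_ranges
-- ===== SOURCE A (Python) =====
-- from typing import Any, Dict, List, Optional, Tuple
--
-- def _find_contiguous_ranges(layers: List[int]) -> List[Tuple[int, int]]:
--     """
--     Find contiguous ranges in a sorted list of layer numbers.
--
--     Args:
--         layers: Sorted list of layer numbers
--
--     Returns:
--         List of (start, end) tuples representing contiguous ranges
--
--     Example:
--         [1, 2, 3, 5, 6, 8] -> [(1, 3), (5, 6), (8, 8)]
--     """
--     if not layers:
--         return []
--
--     ranges = []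
--     start = layers[0]
--     prev = layers[0]
--
--     for layer in layers[1:]:
--         if layer == prev + 1:
--             # Continue the range
--             prev = layer
--         else:
--             # End the current range and start a new one
--             ranges.append((start, prev))
--             start = layer
--             prev = layer
--
--     # Add the final range
--     ranges.append((start, prev))
--
--     return ranges
-- ===== SOURCE B (Python) =====
-- from itertools import groupby
-- from typing import List, Tuple
--
-- def _find_contiguous_ranges(layers: List[int]) -> List[Tuple[int, int]]:
--     ranges = []
--     for _, grp in groupby(enumerate(layers), key=lambda p: p[1] - p[0]):
--         g = list(grp)
--         ranges.append((g[0][1], g[-1][1]))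
--     return ranges
-- ===== Notes on version B (the rewrite author's own statement) =====
-- stated objective: idiomatic
-- what changed: Replaces the explicit start/prev state-machine loop with itertools.groupby over enumerate(layers) keyed by value-minus-index, emitting (first, last) of each group.
import Mathlib
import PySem

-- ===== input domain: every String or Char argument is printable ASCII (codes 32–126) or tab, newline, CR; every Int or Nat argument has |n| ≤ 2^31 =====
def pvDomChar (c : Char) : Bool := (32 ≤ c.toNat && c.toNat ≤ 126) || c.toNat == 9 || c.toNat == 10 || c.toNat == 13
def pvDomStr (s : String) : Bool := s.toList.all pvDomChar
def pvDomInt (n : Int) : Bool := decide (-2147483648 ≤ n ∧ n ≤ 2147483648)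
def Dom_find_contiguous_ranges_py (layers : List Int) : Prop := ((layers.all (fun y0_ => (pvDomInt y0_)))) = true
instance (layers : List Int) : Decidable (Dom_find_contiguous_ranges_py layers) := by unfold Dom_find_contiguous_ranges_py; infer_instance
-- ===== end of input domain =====

-- B replaces A's explicit start/prev state-machine loop by grouping enumerate(layers)
-- on the key value-minus-index (itertools.groupby) and emitting (first, last) of each group.

-- ===== PORT A =====
-- state: (ranges, start, prev); the loop runs over layers[1:]
def find_contiguous_ranges_py (layers : List Int) : List (Int × Int) :=
  match layers with
  | [] => []
  | x :: rest =>
    let s := rest.foldl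
      (fun (st : List (Int × Int) × Int × Int) layer =>
        if layer == st.2.2 + 1 then (st.1, st.2.1, layer)
        else (st.1 ++ [(st.2.1, st.2.2)], layer, layer))
      ([], x, x)
    s.1 ++ [(s.2.1, s.2.2)]

-- ===== PORT B =====
-- hand port of itertools.groupby restricted to the key p.2 - p.1 used by Source B:
-- consecutive elements with equal key form one group
def pvGroupBy : List (Int × Int) → List (List (Int × Int))
  | [] => []
  | p :: rest =>
    (p :: rest.takeWhile (fun q => q.2 - q.1 == p.2 - p.1)) ::
      pvGroupBy (rest.dropWhile (fun q => q.2 - q.1 == p.2 - p.1))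
termination_by l => l.length
decreasing_by
  simpa using Nat.lt_succ_of_le (List.length_dropWhile_le _ _)

def find_contiguous_ranges_py_alt (layers : List Int) : List (Int × Int) :=
  (pvGroupBy (PySem.List.enumerate layers)).map
    (fun g => ((g.headD (0, 0)).2, (g.getLastD (0, 0)).2))

-- ===== PRECONDITION & SPEC =====
def Spec_find_contiguous_ranges_py (layers : List Int) (out : List (Int × Int)) : Prop := out = find_contiguous_ranges_py_alt layers
instance (layers : List Int) (out : List (Int × Int)) : Decidable (Spec_find_contiguous_ranges_py layers out) := by unfold Spec_find_contiguous_ranges_py; infer_instance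

-- ===== CLAIM (what is proved, stated in full; the proofs are below) =====
def Claim_equal_find_contiguous_ranges_py : Prop := ∀ (layers : List Int), Dom_find_contiguous_ranges_py layers → Spec_find_contiguous_ranges_py layers (find_contiguous_ranges_py layers)

-- ===== LEMMAS AND PROOFS =====

-- reference recursion both ports are reduced to
def pvSpec (start prev : Int) : List Int → List (Int × Int)
  | [] => [(start, prev)]
  | l :: ls => if l = prev + 1 then pvSpec start l ls else (start, prev) :: pvSpec l l ls

-- the maximal contiguous run continuing `prev`, and the remainder after it
def pvRunTake (prev : Int) : List Int → List Int
  | [] => []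
  | l :: ls => if l = prev + 1 then l :: pvRunTake l ls else []

def pvRunRest (prev : Int) : List Int → List Int
  | [] => []
  | l :: ls => if l = prev + 1 then pvRunRest l ls else l :: ls

def pvRunEnd (prev : Int) : List Int → Int
  | [] => prev
  | l :: ls => if l = prev + 1 then pvRunEnd l ls else prev

lemma pvRunRest_length_le (prev : Int) (ls : List Int) :
    (pvRunRest prev ls).length ≤ ls.length := by
  induction ls generalizing prev with
  | nil => simp [pvRunRest]
  | cons l ls ih =>
    simp only [pvRunRest]
    split
    · exact (ih l).trans (Nat.le_succ _)
    · simp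

lemma pvSpec_run (start prev : Int) (ls : List Int) :
    pvSpec start prev ls =
      (start, pvRunEnd prev ls) ::
        (match pvRunRest prev ls with
         | [] => []
         | l :: r => pvSpec l l r) := by
  induction ls generalizing prev with
  | nil => simp [pvSpec, pvRunEnd, pvRunRest]
  | cons l ls ih =>
    simp only [pvSpec, pvRunEnd, pvRunRest]
    split
    · exact ih l
    · rfl

-- A's fold equals pvSpec
lemma pvA_fold (ls : List Int) (acc : List (Int × Int)) (start prev : Int) :
    (let s := ls.foldl
        (fun (st : List (Int × Int) × Int × Int) layer =>
          if layer == st.2.2 + 1 then (st.1, st.2.1, layer)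
          else (st.1 ++ [(st.2.1, st.2.2)], layer, layer))
        (acc, start, prev)
     s.1 ++ [(s.2.1, s.2.2)]) = acc ++ pvSpec start prev ls := by
  induction ls generalizing acc start prev with
  | nil => simp [pvSpec]
  | cons l ls ih =>
    simp only [List.foldl_cons, pvSpec]
    by_cases h : l = prev + 1
    · subst h
      simpa using ih acc start (prev + 1)
    · have hb : (l == prev + 1) = false := by simp [h]
      simp only [hb, Bool.false_eq_true, if_false, if_neg h]
      rw [ih]
      simp

-- enumeration with explicit start index (mirror of PySem.List.enumerate)
lemma enumerate_takeWhile (ls : List Int) (j prev : Int) :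
    (PySem.List.enumerate ls j).takeWhile (fun q => q.2 - q.1 == prev + 1 - j) =
      PySem.List.enumerate (pvRunTake prev ls) j := by
  induction ls generalizing j prev with
  | nil => simp [PySem.List.enumerate_nil, pvRunTake]
  | cons l ls ih =>
    rw [PySem.List.enumerate_cons, List.takeWhile_cons]
    by_cases h : l = prev + 1
    · subst h
      rw [if_pos (by simp), pvRunTake, if_pos rfl, PySem.List.enumerate_cons]
      congr 1
      have hkey : (fun q : Int × Int => q.2 - q.1 == prev + 1 - j)
          = (fun q : Int × Int => q.2 - q.1 == prev + 1 + 1 - (j + 1)) := by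
        funext q; congr 1; omega
      rw [hkey]
      exact ih (j + 1) (prev + 1)
    · rw [if_neg (by simp only [beq_iff_eq]; omega), pvRunTake, if_neg h,
        PySem.List.enumerate_nil]

lemma enumerate_dropWhile (ls : List Int) (j prev : Int) :
    ∃ j', (PySem.List.enumerate ls j).dropWhile (fun q => q.2 - q.1 == prev + 1 - j) =
      PySem.List.enumerate (pvRunRest prev ls) j' := by
  induction ls generalizing j prev with
  | nil => exact ⟨j, by simp [PySem.List.enumerate_nil, pvRunRest]⟩
  | cons l ls ih =>
    rw [PySem.List.enumerate_cons, List.dropWhile_cons]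
    by_cases h : l = prev + 1
    · subst h
      rw [if_pos (by simp), pvRunRest, if_pos rfl]
      have hkey : (fun q : Int × Int => q.2 - q.1 == prev + 1 - j)
          = (fun q : Int × Int => q.2 - q.1 == prev + 1 + 1 - (j + 1)) := by
        funext q; congr 1; omega
      rw [hkey]
      exact ih (j + 1) (prev + 1)
    · exact ⟨j, by rw [if_neg (by simp only [beq_iff_eq]; omega), pvRunRest, if_neg h,
        PySem.List.enumerate_cons]⟩

lemma getLast_run (prev : Int) (ls : List Int) (j : Int) :
    (((j, prev) :: PySem.List.enumerate (pvRunTake prev ls) (j + 1)).getLastD (0, 0)).2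
      = pvRunEnd prev ls := by
  induction ls generalizing prev j with
  | nil => simp [pvRunTake, pvRunEnd, PySem.List.enumerate_nil]
  | cons l ls ih =>
    rw [pvRunTake, pvRunEnd]
    by_cases h : l = prev + 1
    · rw [if_pos h, if_pos h, PySem.List.enumerate_cons]
      have := ih l (j + 1)
      simp only [List.getLastD_cons] at this ⊢
      exact this
    · rw [if_neg h, if_neg h, PySem.List.enumerate_nil]
      simp

-- B's grouping equals pvSpec
lemma pvB_aux : ∀ (n : Nat) (ls : List Int), ls.length = n → ∀ (x j : Int),
    ((pvGroupBy ((j, x) :: PySem.List.enumerate ls (j + 1))).map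
      (fun g => ((g.headD (0, 0)).2, (g.getLastD (0, 0)).2))) = pvSpec x x ls := by
  intro n
  induction n using Nat.strong_induction_on with
  | _ n ih =>
  intro ls hn x j
  rw [pvSpec_run]
  rw [pvGroupBy, List.map_cons]
  have hkey : (fun q : Int × Int => q.2 - q.1 == (j, x).2 - (j, x).1)
      = (fun q : Int × Int => q.2 - q.1 == x + 1 - (j + 1)) := by
    funext q; congr 1; simp only; omega
  rw [hkey, enumerate_takeWhile ls (j + 1) x]
  obtain ⟨j', hj'⟩ := enumerate_dropWhile ls (j + 1) x
  rw [hj']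
  congr 1
  · simp only [List.headD_cons]
    rw [getLast_run x ls j]
  · match hrest : pvRunRest x ls with
    | [] => simp [PySem.List.enumerate_nil, pvGroupBy]
    | l :: r =>
      rw [PySem.List.enumerate_cons]
      have hlen : r.length < n := by
        have h1 := pvRunRest_length_le x ls
        rw [hrest] at h1
        simp only [List.length_cons] at h1
        omega
      exact ih r.length hlen r rfl l j'

-- ===== VERDICT (by name: the statement is the Claim_ definition above) =====
theorem find_contiguous_ranges_py_spec : Claim_equal_find_contiguous_ranges_py := by
  intro layers _
  unfold Spec_find_contiguous_ranges_py
  match layers with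
  | [] =>
    simp [find_contiguous_ranges_py, find_contiguous_ranges_py_alt,
      PySem.List.enumerate_nil, pvGroupBy]
  | x :: rest =>
    show find_contiguous_ranges_py (x :: rest) = _
    unfold find_contiguous_ranges_py find_contiguous_ranges_py_alt
    rw [PySem.List.enumerate_cons]
    rw [pvB_aux rest.length rest rfl x 0]
    simpa using pvA_fold rest [] x x
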